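-- pv_equiv track=rewrite | github.com/Zer0pa/ZPE-Geo | code/scripts/gate_e_netnew_package.py | _max_claim_status
-- ===== SOURCE A (Python) =====
-- from typing import Any
--
-- def _has_impr_code(impr: list[dict[str, Any]], resource_hint: str, code: str) -> bool:
--     needle = resource_hint.lower()
--     for row in impr:
--         if str(row.get("impracticality_code", "")) != code:
--             continue
--         hay = f"{row.get('resource', '')} {row.get('claim_impact_note', '')}".lower()
--         if needle in hay:
--             return True
--     return False
--
-- def _max_claim_status(
--     claim_resources: list[str],
--     resource_status: dict[str, str],
--     impr: list[dict[str, Any]],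
--     paused_external_resources: set[str],
-- ) -> str:
--     if any(r in paused_external_resources for r in claim_resources):
--         return "PAUSED_EXTERNAL"
--     if any(resource_status.get(r) in {"FAILED", "MISSING"} for r in claim_resources):
--         return "FAIL_RESOURCE_ATTEMPT"
--     if any(resource_status.get(r) == "BLOCKED_LOCAL" for r in claim_resources):
--         return "FAIL_RUNTIME_BLOCKED"
--     if any(_has_impr_code(impr, r, "IMP-STORAGE") for r in claim_resources):
--         return "FAIL_FULL_CORPUS_NOT_EXECUTED"
--     if any(_has_impr_code(impr, r, "IMP-COMPUTE") for r in claim_resources):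
--         return "FAIL_RUNTIME_BLOCKED"
--     return "PASS"
-- ===== SOURCE B (Python) =====
-- from typing import Any
--
-- _STATUSES = [
--     "PAUSED_EXTERNAL",
--     "FAIL_RESOURCE_ATTEMPT",
--     "FAIL_RUNTIME_BLOCKED",
--     "FAIL_FULL_CORPUS_NOT_EXECUTED",
--     "FAIL_RUNTIME_BLOCKED",
--     "PASS",
-- ]
--
-- def _lowered_haystacks(impr: list[dict[str, Any]], code: str) -> list[str]:
--     return [
--         f"{row.get('resource', '')} {row.get('claim_impact_note', '')}".lower()
--         for row in impr
--         if str(row.get("impracticality_code", "")) == code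
--     ]
--
-- def _max_claim_status(
--     claim_resources: list[str],
--     resource_status: dict[str, str],
--     impr: list[dict[str, Any]],
--     paused_external_resources: set[str],
-- ) -> str:
--     storage_hays = _lowered_haystacks(impr, "IMP-STORAGE")
--     compute_hays = _lowered_haystacks(impr, "IMP-COMPUTE")
--     best = 5
--     for r in claim_resources:
--         if r in paused_external_resources:
--             rank = 0
--         elif resource_status.get(r) in ("FAILED", "MISSING"):
--             rank = 1
--         elif resource_status.get(r) == "BLOCKED_LOCAL":
--             rank = 2
--         else:
--             needle = r.lower()
--             if any(needle in h for h in storage_hays):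
--                 rank = 3
--             elif any(needle in h for h in compute_hays):
--                 rank = 4
--             else:
--                 rank = 5
--         if rank < best:
--             best = rank
--     return _STATUSES[best]
-- ===== Notes on version B (the rewrite author's own statement) =====
-- stated objective: alternative
-- what changed: A runs five sequential any-scans over claim_resources (re-lowering every impracticality haystack per resource); B precomputes the lowered IMP-STORAGE/IMP-COMPUTE haystacks once, makes a single pass over claim_resources computing each resource's lowest matched rule rank, tracks the minimum rank, and indexes a status table.
import Mathlib
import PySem

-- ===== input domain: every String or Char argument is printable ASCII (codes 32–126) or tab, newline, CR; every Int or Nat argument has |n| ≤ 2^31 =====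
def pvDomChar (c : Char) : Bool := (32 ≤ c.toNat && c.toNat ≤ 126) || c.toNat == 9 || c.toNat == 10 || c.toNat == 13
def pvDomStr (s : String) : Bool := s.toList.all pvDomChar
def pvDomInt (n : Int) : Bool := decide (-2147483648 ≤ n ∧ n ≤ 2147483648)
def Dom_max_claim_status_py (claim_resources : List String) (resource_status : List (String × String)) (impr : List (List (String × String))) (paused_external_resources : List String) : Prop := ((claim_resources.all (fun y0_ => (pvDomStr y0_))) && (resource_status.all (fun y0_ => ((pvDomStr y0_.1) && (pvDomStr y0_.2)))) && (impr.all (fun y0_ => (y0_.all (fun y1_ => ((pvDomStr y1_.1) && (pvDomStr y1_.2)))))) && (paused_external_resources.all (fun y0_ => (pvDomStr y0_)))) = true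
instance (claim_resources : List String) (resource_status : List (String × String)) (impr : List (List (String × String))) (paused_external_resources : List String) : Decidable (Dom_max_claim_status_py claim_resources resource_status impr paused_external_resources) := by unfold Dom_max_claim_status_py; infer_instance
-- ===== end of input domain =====

-- B replaces A's five sequential any-scans by one pass over claim_resources tracking the
-- minimum matched rule rank (with the lowered impracticality haystacks precomputed once); objective: alternative.


-- ===== PORT A =====
-- _has_impr_code: the for-loop with early 'return True' and final 'return False' is List.any;
-- the 'continue' branch is the 'then false' arm.  str(...) is the identity on the String values here.
def has_impr_code (impr : List (List (String × String))) (resource_hint : String) (code : String) : Bool :=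
  let needle := PySem.Str.lower resource_hint
  impr.any (fun row =>
    if (PySem.Dict.mk row).getD "impracticality_code" "" ≠ code then false
    else PySem.Str.isIn needle
      (PySem.Str.lower (PySem.Str.join " "
        [(PySem.Dict.mk row).getD "resource" "", (PySem.Dict.mk row).getD "claim_impact_note" ""])))

def max_claim_status_py (claim_resources : List String) (resource_status : List (String × String)) (impr : List (List (String × String))) (paused_external_resources : List String) : String :=
  if claim_resources.any (fun r => PySem.Set.contains paused_external_resources r) then "PAUSED_EXTERNAL"
  else if claim_resources.any (fun r =>
      (PySem.Dict.mk resource_status).get? r == some "FAILED" ||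
      (PySem.Dict.mk resource_status).get? r == some "MISSING") then "FAIL_RESOURCE_ATTEMPT"
  else if claim_resources.any (fun r =>
      (PySem.Dict.mk resource_status).get? r == some "BLOCKED_LOCAL") then "FAIL_RUNTIME_BLOCKED"
  else if claim_resources.any (fun r => has_impr_code impr r "IMP-STORAGE") then "FAIL_FULL_CORPUS_NOT_EXECUTED"
  else if claim_resources.any (fun r => has_impr_code impr r "IMP-COMPUTE") then "FAIL_RUNTIME_BLOCKED"
  else "PASS"

-- ===== PORT B =====
def pvStatuses : List String :=
  ["PAUSED_EXTERNAL", "FAIL_RESOURCE_ATTEMPT", "FAIL_RUNTIME_BLOCKED",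
   "FAIL_FULL_CORPUS_NOT_EXECUTED", "FAIL_RUNTIME_BLOCKED", "PASS"]

-- Source B's _lowered_haystacks comprehension: filter on the code, then build the lowered haystack
def lowered_haystacks (impr : List (List (String × String))) (code : String) : List String :=
  (impr.filter (fun row => (PySem.Dict.mk row).getD "impracticality_code" "" == code)).map
    (fun row => PySem.Str.lower (PySem.Str.join " "
      [(PySem.Dict.mk row).getD "resource" "", (PySem.Dict.mk row).getD "claim_impact_note" ""]))

-- the body of Source B's loop: the lowest-index rule this resource satisfies (5 = none)
def alt_rank (resource_status : List (String × String)) (paused_external_resources : List String)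
    (storage_hays compute_hays : List String) (r : String) : Nat :=
  if PySem.Set.contains paused_external_resources r then 0
  else if (PySem.Dict.mk resource_status).get? r == some "FAILED" ||
          (PySem.Dict.mk resource_status).get? r == some "MISSING" then 1
  else if (PySem.Dict.mk resource_status).get? r == some "BLOCKED_LOCAL" then 2
  else
    let needle := PySem.Str.lower r
    if storage_hays.any (fun h => PySem.Str.isIn needle h) then 3
    else if compute_hays.any (fun h => PySem.Str.isIn needle h) then 4
    else 5

def max_claim_status_py_alt (claim_resources : List String) (resource_status : List (String × String)) (impr : List (List (String × String))) (paused_external_resources : List String) : String :=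
  let storage_hays := lowered_haystacks impr "IMP-STORAGE"
  let compute_hays := lowered_haystacks impr "IMP-COMPUTE"
  let best := claim_resources.foldl (fun best r =>
    let rank := alt_rank resource_status paused_external_resources storage_hays compute_hays r
    if rank < best then rank else best) 5
  -- best ≤ 5 always, so Python's pvStatuses[best] never raises; List.getD is exact here
  pvStatuses.getD best ""

-- ===== PRECONDITION & SPEC =====
def Spec_max_claim_status_py (claim_resources : List String) (resource_status : List (String × String)) (impr : List (List (String × String))) (paused_external_resources : List String) (out : String) : Prop := out = max_claim_status_py_alt claim_resources resource_status impr paused_external_resources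
instance (claim_resources : List String) (resource_status : List (String × String)) (impr : List (List (String × String))) (paused_external_resources : List String) (out : String) : Decidable (Spec_max_claim_status_py claim_resources resource_status impr paused_external_resources out) := by unfold Spec_max_claim_status_py; infer_instance

-- ===== CLAIM (what is proved, stated in full; the proofs are below) =====
def Claim_equal_max_claim_status_py : Prop := ∀ (claim_resources : List String) (resource_status : List (String × String)) (impr : List (List (String × String))) (paused_external_resources : List String), Dom_max_claim_status_py claim_resources resource_status impr paused_external_resources → Spec_max_claim_status_py claim_resources resource_status impr paused_external_resources (max_claim_status_py claim_resources resource_status impr paused_external_resources)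

-- ===== LEMMAS AND PROOFS =====

-- B's any-over-precomputed-haystacks coincides with A's _has_impr_code
lemma hays_any_eq (impr : List (List (String × String))) (r code : String) :
    (lowered_haystacks impr code).any (fun h => PySem.Str.isIn (PySem.Str.lower r) h)
      = has_impr_code impr r code := by
  simp only [lowered_haystacks, has_impr_code, List.any_map, List.any_filter]
  congr 1
  funext row
  by_cases h : (PySem.Dict.mk row).getD "impracticality_code" "" = code <;> simp [h]

-- alt_rank with the haystack scans replaced by A's _has_impr_code
lemma alt_rank_spec (rs : List (String × String)) (pe : List String)
    (impr : List (List (String × String))) (r : String) :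
    alt_rank rs pe (lowered_haystacks impr "IMP-STORAGE") (lowered_haystacks impr "IMP-COMPUTE") r
      = if PySem.Set.contains pe r then 0
        else if (PySem.Dict.mk rs).get? r == some "FAILED" ||
                (PySem.Dict.mk rs).get? r == some "MISSING" then 1
        else if (PySem.Dict.mk rs).get? r == some "BLOCKED_LOCAL" then 2
        else if has_impr_code impr r "IMP-STORAGE" then 3
        else if has_impr_code impr r "IMP-COMPUTE" then 4
        else 5 := by
  simp only [alt_rank, hays_any_eq]

-- foldl-min facts
lemma foldl_min_le_init {a : Type} (f : a -> Nat) (l : List a) (i : Nat) :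
    l.foldl (fun b x => if f x < b then f x else b) i <= i := by
  induction l generalizing i with
  | nil => simp
  | cons x xs ih =>
    simp only [List.foldl_cons]
    exact le_trans (ih _) (by split <;> omega)

lemma foldl_min_le_of_mem {a : Type} (f : a -> Nat) (l : List a) (i : Nat) (r : a) (h : r ∈ l) :
    l.foldl (fun b x => if f x < b then f x else b) i <= f r := by
  induction l generalizing i with
  | nil => cases h
  | cons x xs ih =>
    simp only [List.foldl_cons]
    rcases List.mem_cons.mp h with h | h
    · subst h
      exact le_trans (foldl_min_le_init f xs _) (by split <;> omega)
    · exact ih _ h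

lemma le_foldl_min {a : Type} (f : a -> Nat) (l : List a) (i k : Nat)
    (ha : k <= i) (h : ∀ r ∈ l, k <= f r) :
    k <= l.foldl (fun b x => if f x < b then f x else b) i := by
  induction l generalizing i with
  | nil => simpa
  | cons x xs ih =>
    simp only [List.foldl_cons]
    have hx := h x List.mem_cons_self
    exact ih _ (by split <;> omega) (fun r hr => h r (List.mem_cons_of_mem _ hr))

lemma foldl_min_eq {a : Type} (f : a -> Nat) (l : List a) (k : Nat) (hk : k <= 5)
    (hex : ∃ r ∈ l, f r <= k) (hall : ∀ r ∈ l, k <= f r) :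
    l.foldl (fun b x => if f x < b then f x else b) 5 = k := by
  obtain ⟨r, hr, hle⟩ := hex
  exact le_antisymm (le_trans (foldl_min_le_of_mem f l 5 r hr) hle) (le_foldl_min f l 5 k hk hall)

-- ===== VERDICT (by name: the statement is the Claim_ definition above) =====
theorem max_claim_status_py_spec : Claim_equal_max_claim_status_py := by
  intro cr rs impr pe _
  show max_claim_status_py cr rs impr pe = max_claim_status_py_alt cr rs impr pe
  set f := alt_rank rs pe (lowered_haystacks impr "IMP-STORAGE") (lowered_haystacks impr "IMP-COMPUTE") with hfdef
  have frw : ∀ r, f r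
      = if PySem.Set.contains pe r then 0
        else if (PySem.Dict.mk rs).get? r == some "FAILED" ||
                (PySem.Dict.mk rs).get? r == some "MISSING" then 1
        else if (PySem.Dict.mk rs).get? r == some "BLOCKED_LOCAL" then 2
        else if has_impr_code impr r "IMP-STORAGE" then 3
        else if has_impr_code impr r "IMP-COMPUTE" then 4
        else 5 := fun r => alt_rank_spec rs pe impr r
  have halt : max_claim_status_py_alt cr rs impr pe
      = pvStatuses.getD (cr.foldl (fun b x => if f x < b then f x else b) 5) "" := rfl
  rw [halt]
  unfold max_claim_status_py
  by_cases h0 : cr.any (fun r => PySem.Set.contains pe r) = true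
  · obtain ⟨r, hr, hc⟩ := List.any_eq_true.mp h0
    rw [if_pos h0, foldl_min_eq f cr 0 (by omega)
      ⟨r, hr, by rw [frw r, if_pos hc]⟩ (fun _ _ => Nat.zero_le _)]
    rfl
  · have n0 : ∀ x ∈ cr, ¬ PySem.Set.contains pe x = true :=
      List.any_eq_false.mp (Bool.eq_false_iff.mpr h0)
    rw [if_neg h0]
    by_cases h1 : cr.any (fun r => (PySem.Dict.mk rs).get? r == some "FAILED" ||
        (PySem.Dict.mk rs).get? r == some "MISSING") = true
    · obtain ⟨r, hr, hc⟩ := List.any_eq_true.mp h1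
      rw [if_pos h1, foldl_min_eq f cr 1 (by omega)
        ⟨r, hr, by rw [frw r, if_neg (n0 r hr), if_pos hc]⟩
        (fun x hx => by rw [frw x, if_neg (n0 x hx)]; split_ifs <;> omega)]
      rfl
    · have n1 : ∀ x ∈ cr, ¬ ((PySem.Dict.mk rs).get? x == some "FAILED" ||
          (PySem.Dict.mk rs).get? x == some "MISSING") = true :=
        List.any_eq_false.mp (Bool.eq_false_iff.mpr h1)
      rw [if_neg h1]
      by_cases h2 : cr.any (fun r => (PySem.Dict.mk rs).get? r == some "BLOCKED_LOCAL") = true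
      · obtain ⟨r, hr, hc⟩ := List.any_eq_true.mp h2
        rw [if_pos h2, foldl_min_eq f cr 2 (by omega)
          ⟨r, hr, by rw [frw r, if_neg (n0 r hr), if_neg (n1 r hr), if_pos hc]⟩
          (fun x hx => by rw [frw x, if_neg (n0 x hx), if_neg (n1 x hx)]; split_ifs <;> omega)]
        rfl
      · have n2 : ∀ x ∈ cr, ¬ ((PySem.Dict.mk rs).get? x == some "BLOCKED_LOCAL") = true :=
          List.any_eq_false.mp (Bool.eq_false_iff.mpr h2)
        rw [if_neg h2]
        by_cases h3 : cr.any (fun r => has_impr_code impr r "IMP-STORAGE") = true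
        · obtain ⟨r, hr, hc⟩ := List.any_eq_true.mp h3
          rw [if_pos h3, foldl_min_eq f cr 3 (by omega)
            ⟨r, hr, by rw [frw r, if_neg (n0 r hr), if_neg (n1 r hr), if_neg (n2 r hr), if_pos hc]⟩
            (fun x hx => by
              rw [frw x, if_neg (n0 x hx), if_neg (n1 x hx), if_neg (n2 x hx)]; split_ifs <;> omega)]
          rfl
        · have n3 : ∀ x ∈ cr, ¬ has_impr_code impr x "IMP-STORAGE" = true :=
            List.any_eq_false.mp (Bool.eq_false_iff.mpr h3)
          rw [if_neg h3]
          by_cases h4 : cr.any (fun r => has_impr_code impr r "IMP-COMPUTE") = true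
          · obtain ⟨r, hr, hc⟩ := List.any_eq_true.mp h4
            rw [if_pos h4, foldl_min_eq f cr 4 (by omega)
              ⟨r, hr, by
                rw [frw r, if_neg (n0 r hr), if_neg (n1 r hr), if_neg (n2 r hr),
                    if_neg (n3 r hr), if_pos hc]⟩
              (fun x hx => by
                rw [frw x, if_neg (n0 x hx), if_neg (n1 x hx), if_neg (n2 x hx),
                    if_neg (n3 x hx)]; split_ifs <;> omega)]
            rfl
          · have n4 : ∀ x ∈ cr, ¬ has_impr_code impr x "IMP-COMPUTE" = true :=
              List.any_eq_false.mp (Bool.eq_false_iff.mpr h4)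
            rw [if_neg h4,
              le_antisymm (foldl_min_le_init f cr 5)
                (le_foldl_min f cr 5 5 le_rfl (fun x hx => by
                  rw [frw x, if_neg (n0 x hx), if_neg (n1 x hx), if_neg (n2 x hx),
                      if_neg (n3 x hx), if_neg (n4 x hx)]))]
            rfl
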